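-- pv_equiv track=rewrite | github.com/overtimepog/CubeMerger | scripts/generate_levels.py | puzzle_solvable
-- ===== SOURCE A (Python) =====
-- from typing import List, Dict, Tuple
-- from copy import deepcopy
--
-- def can_connect(grid: List[List[str]], p1: Tuple[int,int], p2: Tuple[int,int]) -> bool:
--     """
--     Checks if p1 and p2 are in the same row or column,
--     with no 'X' in between.
--     """
--     x1, y1 = p1
--     x2, y2 = p2
--
--     # same row
--     if x1 == x2:
--         start, end = sorted([y1, y2])
--         for col in range(start+1, end):
--             if grid[x1][col] == "X":
--                 return False
--         return True
--
--     # same column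
--     if y1 == y2:
--         start, end = sorted([x1, x2])
--         for row in range(start+1, end):
--             if grid[row][y1] == "X":
--                 return False
--         return True
--
--     return False
--
-- def find_pairs(grid: List[List[str]]) -> Dict[str, List[Tuple[int,int]]]:
--     """
--     Returns a mapping { '2': [(x1,y1), (x2,y2), ...], '4': [...], ... }
--     skipping 'X' and '' cells.
--     """
--     pairs_map = {}
--     size = len(grid)
--     for i in range(size):
--         for j in range(size):
--             val = grid[i][j]
--             if val not in ("", "X"):  # so it's a number
--                 pairs_map.setdefault(val, []).append((i, j))
--     return pairs_map
--
-- def puzzle_solvable(grid: List[List[str]]) -> bool: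
--     """
--     A backtracking solver that tries to remove pairs (same number)
--     if they can connect in a straight line (row/col).
--     If all pairs can be removed, returns True; else False.
--     """
--     grid_copy = deepcopy(grid)
--     pairs_map = find_pairs(grid_copy)
--
--     # If no numbered cells remain, puzzle is solved
--     if not pairs_map:
--         return True
--
--     # Try each pair among the coordinates for each number
--     for val, coords in pairs_map.items():
--         n = len(coords)
--         # Might have multiple occurrences of the same number
--         # We'll try each distinct pair.
--         for i in range(n):
--             for j in range(i+1, n):
--                 p1, p2 = coords[i], coords[j]
--                 if can_connect(grid_copy, p1, p2):
--                     # Remove them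
--                     x1, y1 = p1
--                     x2, y2 = p2
--                     saved_val = val
--                     grid_copy[x1][y1] = ""
--                     grid_copy[x2][y2] = ""
--
--                     if puzzle_solvable(grid_copy):
--                         return True
--
--                     # backtrack
--                     grid_copy[x1][y1] = saved_val
--                     grid_copy[x2][y2] = saved_val
--
--     # If no solution found
--     return False
-- ===== SOURCE B (Python) =====
-- def puzzle_solvable(grid):
--     """
--     Connectivity is static (only 'X' blocks, removed cells never block), so the
--     puzzle is solvable iff, independently for each number value, its cells can be
--     perfectly matched along clear lines.  No grid mutation, no deepcopy.
--     """
--     size = len(grid)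
--     cells = [(i, j) for i in range(size) for j in range(size)
--              if grid[i][j] not in ("", "X")]
--
--     def clear(p, q):
--         if p[0] == q[0]:
--             lo, hi = min(p[1], q[1]), max(p[1], q[1])
--             return all(grid[p[0]][c] != "X" for c in range(lo + 1, hi))
--         if p[1] == q[1]:
--             lo, hi = min(p[0], q[0]), max(p[0], q[0])
--             return all(grid[r][p[1]] != "X" for r in range(lo + 1, hi))
--         return False
--
--     groups = {}
--     for c in cells:
--         groups.setdefault(grid[c[0]][c[1]], []).append(c)
--
--     def matchable(pts):
--         if not pts:
--             return True
--         p, rest = pts[0], pts[1:]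
--         for k in range(len(rest)):
--             if clear(p, rest[k]) and matchable(rest[:k] + rest[k + 1:]):
--                 return True
--         return False
--
--     return all(matchable(g) for g in groups.values())
-- ===== Notes on version B (the rewrite author's own statement) =====
-- stated objective: faster
-- what changed: Connectivity is static (only 'X' blocks; removals never change reachability), so B drops A's grid mutation/deepcopy and whole-grid backtracking and instead checks, independently per number value, that the value's cells admit a perfect matching along clear lines, fixing the first unmatched cell at each step; this shrinks A's search tree (all pairs of all values at every depth, recomputing the pair map and rescanning lines each call) to independent per-group matchings with a forced pivot.
import Mathlib
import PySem

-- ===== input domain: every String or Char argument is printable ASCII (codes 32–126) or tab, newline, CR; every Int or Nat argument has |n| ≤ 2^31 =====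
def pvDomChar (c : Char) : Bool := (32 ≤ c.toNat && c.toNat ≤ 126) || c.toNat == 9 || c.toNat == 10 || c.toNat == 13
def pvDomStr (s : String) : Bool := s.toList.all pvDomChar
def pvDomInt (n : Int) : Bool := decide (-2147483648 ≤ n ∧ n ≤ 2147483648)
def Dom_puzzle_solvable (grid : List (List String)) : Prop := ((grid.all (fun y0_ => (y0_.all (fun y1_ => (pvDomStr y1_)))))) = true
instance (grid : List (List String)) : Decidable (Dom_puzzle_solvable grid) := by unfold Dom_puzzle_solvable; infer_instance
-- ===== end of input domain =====

-- B replaces A's mutate-and-backtrack over the whole grid by independent per-value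
-- perfect-matching searches on the STATIC line-connectivity (objective: faster).

-- ===== PORT A =====

-- can_connect: same row/column with no "X" strictly between (sorted([y1,y2]) = (min, max)).
def canConnect (grid : List (List String)) (p1 p2 : Nat × Nat) : Bool :=
  if p1.1 = p2.1 then
    (List.range' (min p1.2 p2.2 + 1) (max p1.2 p2.2 - (min p1.2 p2.2 + 1))).all
      (fun col => !(((grid.getD p1.1 []).getD col "") == "X"))
  else if p1.2 = p2.2 then
    (List.range' (min p1.1 p2.1 + 1) (max p1.1 p2.1 - (min p1.1 p2.1 + 1))).all
      (fun row => !(((grid.getD row []).getD p1.2 "") == "X"))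
  else false

-- find_pairs: pairs_map.setdefault(val, []).append((i, j)) is Dict.modify val [] (· ++ [(i, j)]).
def findPairs (grid : List (List String)) : PySem.Dict String (List (Nat × Nat)) :=
  (List.range grid.length).foldl (fun d i =>
    (List.range grid.length).foldl (fun d j =>
      let v := (grid.getD i []).getD j ""
      if v ≠ "" ∧ v ≠ "X" then d.modify v [] (· ++ [(i, j)]) else d) d)
    PySem.Dict.empty

-- grid_copy[x][y] = ""
def blankCell (grid : List (List String)) (p : Nat × Nat) : List (List String) :=
  grid.set p.1 ((grid.getD p.1 []).set p.2 "")

-- the backtracking search; fuel is only a totality guard (each call removes 2 cells,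
-- so size*size + 1 fuel is never exhausted — proved below).
def solvAux : Nat → List (List String) → Bool
  | 0, _ => false
  | fuel + 1, grid =>
    let pm := findPairs grid
    if pm.items.isEmpty then true
    else pm.items.any (fun vc =>
      (List.range vc.2.length).any (fun i =>
        (List.range' (i + 1) (vc.2.length - (i + 1))).any (fun j =>
          let p1 := vc.2.getD i (0, 0)
          let p2 := vc.2.getD j (0, 0)
          canConnect grid p1 p2 && solvAux fuel (blankCell (blankCell grid p1) p2))))

def puzzle_solvable (grid : List (List String)) : Bool :=
  solvAux (grid.length * grid.length + 1) grid

-- ===== PORT B =====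

-- clear(p, q): static line test on the ORIGINAL grid.
def lineClear (grid : List (List String)) (p q : Nat × Nat) : Bool :=
  if p.1 = q.1 then
    (List.range' (min p.2 q.2 + 1) (max p.2 q.2 - (min p.2 q.2 + 1))).all
      (fun c => !(((grid.getD p.1 []).getD c "") == "X"))
  else if p.2 = q.2 then
    (List.range' (min p.1 q.1 + 1) (max p.1 q.1 - (min p.1 q.1 + 1))).all
      (fun r => !(((grid.getD r []).getD p.2 "") == "X"))
  else false

-- cells = [(i, j) for i in range(size) for j in range(size) if grid[i][j] not in ("", "X")]
def cellsB (grid : List (List String)) : List (Nat × Nat) :=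
  (List.range grid.length).flatMap (fun i =>
    (List.range grid.length).filterMap (fun j =>
      let v := (grid.getD i []).getD j ""
      if v ≠ "" ∧ v ≠ "X" then some (i, j) else none))

-- groups.setdefault(grid[c[0]][c[1]], []).append(c)
def groupsB (grid : List (List String)) : PySem.Dict String (List (Nat × Nat)) :=
  (cellsB grid).foldl
    (fun d c => d.modify ((grid.getD c.1 []).getD c.2 "") [] (· ++ [c]))
    PySem.Dict.empty

-- matchable(pts): fix the first point, try every partner; fuel pts.length suffices.
def matchAux (grid : List (List String)) : Nat → List (Nat × Nat) → Bool
  | _, [] => true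
  | 0, _ :: _ => false
  | fuel + 1, p :: rest =>
    (List.range rest.length).any (fun k =>
      lineClear grid p (rest.getD k (0, 0)) &&
      matchAux grid fuel (rest.take k ++ rest.drop (k + 1)))

def puzzle_solvable_alt (grid : List (List String)) : Bool :=
  (groupsB grid).items.all (fun vg => matchAux grid vg.2.length vg.2)

-- ===== PRECONDITION & SPEC =====
-- Python A indexes grid[i][j] for all i, j < len(grid): it raises IndexError exactly
-- when some row is shorter than the grid; Pre_ excludes exactly those inputs.
def Pre_puzzle_solvable (grid : List (List String)) : Prop :=
  ∀ row ∈ grid, grid.length ≤ row.length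
instance (grid : List (List String)) : Decidable (Pre_puzzle_solvable grid) := by
  unfold Pre_puzzle_solvable; infer_instance

def pvWitness_puzzle_solvable : List (List String) := [["1", "1"], ["", "X"]]

def Spec_puzzle_solvable (grid : List (List String)) (out : Bool) : Prop := out = puzzle_solvable_alt grid
instance (grid : List (List String)) (out : Bool) : Decidable (Spec_puzzle_solvable grid out) := by unfold Spec_puzzle_solvable; infer_instance

-- ===== CLAIM (what is proved, stated in full; the proofs are below) =====
def Claim_equal_puzzle_solvable : Prop := ∀ (grid : List (List String)), Dom_puzzle_solvable grid → Pre_puzzle_solvable grid → Spec_puzzle_solvable grid (puzzle_solvable grid)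

-- ===== LEMMAS AND PROOFS =====

-- value of a cell
def valAt (g : List (List String)) (c : Nat × Nat) : String := (g.getD c.1 []).getD c.2 ""

-- row-major stream of (value, cell) for the number cells
def scanOf (g : List (List String)) : List (String × (Nat × Nat)) :=
  (List.range g.length).flatMap (fun i =>
    (List.range g.length).filterMap (fun j =>
      if valAt g (i, j) ≠ "" ∧ valAt g (i, j) ≠ "X" then some (valAt g (i, j), (i, j)) else none))

def cells (g : List (List String)) : List (Nat × Nat) := (scanOf g).map (·.2)

def group (g : List (List String)) (v : String) : List (Nat × Nat) :=
  ((scanOf g).filter (fun p => p.1 == v)).map (·.2)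

-- perfect matchability along adj, up to permutation
inductive Mat (adj : Nat × Nat → Nat × Nat → Bool) : List (Nat × Nat) → Prop
  | nil : Mat adj []
  | step {p q : Nat × Nat} {l l' : List (Nat × Nat)} :
      adj p q = true → l'.Perm (p :: q :: l) → Mat adj l → Mat adj l'

def AllM (g : List (List String)) : Prop := ∀ v, Mat (canConnect g) (group g v)

-- ---------- dictionary shape of find_pairs / groups ----------

theorem foldl_filterMap_if {α β γ : Type} (l : List α) (c : α → Prop) [DecidablePred c] (f : α → β)
    (step : γ → β → γ) (init : γ) :
    ((l.filterMap (fun x => if c x then some (f x) else none)).foldl step init)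
      = l.foldl (fun a x => if c x then step a (f x) else a) init := by
  induction l generalizing init with
  | nil => rfl
  | cons x xs ih => by_cases h : c x <;> simp [h, ih]

theorem findPairs_eq (g : List (List String)) :
    findPairs g = (scanOf g).foldl (fun d p => d.modify p.1 [] (· ++ [p.2])) PySem.Dict.empty := by
  unfold findPairs scanOf
  rw [List.foldl_flatMap]
  apply PySem.List.foldl_congr_mem
  intro d i _
  rw [foldl_filterMap_if]
  rfl

theorem getD_findPairs (g : List (List String)) (v : String) :
    (findPairs g).getD v [] = group g v := by
  rw [findPairs_eq, PySem.Dict.getD_foldl_modify_append]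
  simp [group, PySem.Dict.getD_empty]

theorem keys_findPairs (g : List (List String)) :
    (findPairs g).keys = PySem.Set.ofList ((scanOf g).map (·.1)) := by
  rw [findPairs_eq,
    PySem.Dict.keys_foldl_modify_key (scanOf g) (fun p => p.1) ([] : List (Nat × Nat))
      (fun _ p => (· ++ [p.2])) PySem.Dict.empty,
    PySem.Dict.keys_empty, PySem.Set.update_nil_left]

theorem nodup_keys_findPairs (g : List (List String)) : (findPairs g).keys.Nodup := by
  rw [keys_findPairs]; exact PySem.Set.nodup_ofList _

theorem items_findPairs (g : List (List String)) :
    (findPairs g).items = (findPairs g).keys.map (fun k => (k, group g k)) := by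
  rw [PySem.Dict.items_eq_map_keys _ (nodup_keys_findPairs g) []]
  exact List.map_congr_left (fun k _ => by rw [getD_findPairs])

theorem mem_keys_findPairs (g : List (List String)) (v : String) :
    v ∈ (findPairs g).keys ↔ ∃ p ∈ scanOf g, p.1 = v := by
  rw [keys_findPairs]
  simp [PySem.Set.mem_ofList, List.mem_map]

-- ---------- membership and nodup facts ----------

theorem mem_scanOf (g : List (List String)) (p : String × (Nat × Nat)) :
    p ∈ scanOf g ↔ (p.2.1 < g.length ∧ p.2.2 < g.length ∧ p.1 = valAt g p.2
      ∧ p.1 ≠ "" ∧ p.1 ≠ "X") := by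
  obtain ⟨v, x, y⟩ := p
  unfold scanOf
  simp only [List.mem_flatMap, List.mem_filterMap, List.mem_range]
  constructor
  · rintro ⟨i, hi, j, hj, hf⟩
    by_cases hc : valAt g (i, j) ≠ "" ∧ valAt g (i, j) ≠ "X"
    · rw [if_pos hc] at hf
      simp only [Option.some.injEq, Prod.mk.injEq] at hf
      obtain ⟨h3, h1, h2⟩ := hf
      subst h1; subst h2
      exact ⟨hi, hj, h3.symm, by rw [← h3]; exact hc.1, by rw [← h3]; exact hc.2⟩
    · rw [if_neg hc] at hf; cases hf
  · rintro ⟨h1, h2, h3, h4, h5⟩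
    refine ⟨x, h1, y, h2, ?_⟩
    rw [if_pos ⟨by rw [← h3]; exact h4, by rw [← h3]; exact h5⟩, ← h3]

theorem cellsB_eq (g : List (List String)) : cellsB g = cells g := by
  simp only [cells, scanOf, List.map_flatMap, List.map_filterMap, apply_ite,
    Option.map_some, Option.map_none]
  rfl

theorem groupsB_eq (g : List (List String)) : groupsB g = findPairs g := by
  unfold groupsB
  rw [cellsB_eq, cells, List.foldl_map, findPairs_eq]
  apply PySem.List.foldl_congr_mem
  intro d p hp
  rw [((mem_scanOf g p).mp hp).2.2.1]
  rfl

theorem fst_of_mem_inner (g : List (List String)) (i : Nat) (x : String × (Nat × Nat))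
    (hx : x ∈ (List.range g.length).filterMap (fun j =>
      if valAt g (i, j) ≠ "" ∧ valAt g (i, j) ≠ "X" then some (valAt g (i, j), (i, j)) else none)) :
    x.2.1 = i := by
  obtain ⟨j, _, hsome⟩ := List.mem_filterMap.mp hx
  by_cases h : valAt g (i, j) ≠ "" ∧ valAt g (i, j) ≠ "X"
  · rw [if_pos h] at hsome
    obtain rfl := Option.some.inj hsome
    rfl
  · rw [if_neg h] at hsome; cases hsome

theorem nodup_scanOf (g : List (List String)) : (scanOf g).Nodup := by
  unfold scanOf
  rw [List.nodup_flatMap]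
  constructor
  · intro i _
    refine List.Nodup.filterMap ?_ List.nodup_range
    intro a a' b hb hb'
    rw [Option.mem_def] at hb hb'
    by_cases h : valAt g (i, a) ≠ "" ∧ valAt g (i, a) ≠ "X"
    · rw [if_pos h] at hb
      by_cases h' : valAt g (i, a') ≠ "" ∧ valAt g (i, a') ≠ "X"
      · rw [if_pos h'] at hb'
        have h2 := hb.trans hb'.symm
        simp only [Option.some.injEq, Prod.mk.injEq] at h2
        exact h2.2.2
      · rw [if_neg h'] at hb'; cases hb'
    · rw [if_neg h] at hb; cases hb
  · refine List.Pairwise.imp ?_ List.nodup_range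
    intro i i' hne x hx hx'
    exact hne ((fst_of_mem_inner g i x hx).symm.trans (fst_of_mem_inner g i' x hx'))

theorem nodup_cells (g : List (List String)) : (cells g).Nodup := by
  refine List.Nodup.map_on ?_ (nodup_scanOf g)
  intro x hx y hy hxy
  have h1 := ((mem_scanOf g x).mp hx).2.2.1
  have h2 := ((mem_scanOf g y).mp hy).2.2.1
  exact Prod.ext (by rw [h1, h2, hxy]) hxy

theorem nodup_group (g : List (List String)) (v : String) : (group g v).Nodup := by
  refine List.Nodup.map_on ?_ (List.Nodup.filter _ (nodup_scanOf g))
  intro x hx y hy hxy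
  have hx' := List.mem_of_mem_filter hx
  have hy' := List.mem_of_mem_filter hy
  have h1 := ((mem_scanOf g x).mp hx').2.2.1
  have h2 := ((mem_scanOf g y).mp hy').2.2.1
  exact Prod.ext (by rw [h1, h2, hxy]) hxy

theorem mem_cells (g : List (List String)) (c : Nat × Nat) :
    c ∈ cells g ↔ (c.1 < g.length ∧ c.2 < g.length ∧ valAt g c ≠ "" ∧ valAt g c ≠ "X") := by
  unfold cells
  rw [List.mem_map]
  constructor
  · rintro ⟨p, hp, rfl⟩
    obtain ⟨h1, h2, h3, h4, h5⟩ := (mem_scanOf g p).mp hp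
    exact ⟨h1, h2, by rw [← h3]; exact h4, by rw [← h3]; exact h5⟩
  · rintro ⟨h1, h2, h3, h4⟩
    exact ⟨(valAt g c, c), (mem_scanOf g _).mpr ⟨h1, h2, rfl, h3, h4⟩, rfl⟩

theorem mem_group (g : List (List String)) (v : String) (c : Nat × Nat) :
    c ∈ group g v ↔ (c ∈ cells g ∧ valAt g c = v) := by
  unfold group
  rw [List.mem_map, mem_cells]
  constructor
  · rintro ⟨p, hp, rfl⟩
    obtain ⟨hps, hpv⟩ := List.mem_filter.mp hp
    obtain ⟨h1, h2, h3, h4, h5⟩ := (mem_scanOf g p).mp hps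
    have hv : p.1 = v := by simpa using hpv
    exact ⟨⟨h1, h2, by rw [← h3]; exact h4, by rw [← h3]; exact h5⟩, by rw [← h3, hv]⟩
  · rintro ⟨⟨h1, h2, h3, h4⟩, h5⟩
    refine ⟨(valAt g c, c), List.mem_filter.mpr ⟨(mem_scanOf g _).mpr ⟨h1, h2, rfl, h3, h4⟩, by simpa using h5⟩, rfl⟩

theorem cells_len_le (g : List (List String)) : (cells g).length ≤ g.length * g.length := by
  unfold cells scanOf
  rw [List.length_map, List.length_flatMap]
  have hb : ∀ x ∈ (List.range g.length).map (fun i => ((List.range g.length).filterMap (fun j =>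
      if valAt g (i, j) ≠ "" ∧ valAt g (i, j) ≠ "X" then some (valAt g (i, j), (i, j)) else none)).length),
      x ≤ g.length := by
    intro x hx
    obtain ⟨i, _, rfl⟩ := List.mem_map.mp hx
    calc _ ≤ (List.range g.length).length := List.length_filterMap_le _ _
      _ = g.length := List.length_range
  calc _ ≤ _ := List.sum_le_card_nsmul _ _ hb
    _ = g.length * g.length := by
      rw [List.length_map, List.length_range, smul_eq_mul]

-- ---------- the geometry: symmetry, line test equality, static under blanking ----------

theorem lineClear_eq_canConnect (g : List (List String)) (p q : Nat × Nat) :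
    lineClear g p q = canConnect g p q := rfl

theorem canConnect_symm (g : List (List String)) (p q : Nat × Nat) :
    canConnect g p q = canConnect g q p := by
  unfold canConnect
  by_cases h1 : p.1 = q.1
  · rw [if_pos h1, if_pos h1.symm, Nat.min_comm p.2 q.2, Nat.max_comm p.2 q.2, h1]
  · have h1' : ¬ q.1 = p.1 := fun h => h1 h.symm
    rw [if_neg h1, if_neg h1']
    by_cases h2 : p.2 = q.2
    · rw [if_pos h2, if_pos h2.symm, Nat.min_comm p.1 q.1, Nat.max_comm p.1 q.1, h2]
    · have h2' : ¬ q.2 = p.2 := fun h => h2 h.symm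
      rw [if_neg h2, if_neg h2']

theorem canConnect_congr (g g' : List (List String))
    (h : ∀ c, (valAt g c = "X") ↔ (valAt g' c = "X")) (p q : Nat × Nat) :
    canConnect g p q = canConnect g' p q := by
  have hb : ∀ c, ((valAt g c) == "X") = ((valAt g' c) == "X") := by
    intro c
    by_cases hx : valAt g c = "X"
    · simp [hx, (h c).mp hx]
    · have hx' : valAt g' c ≠ "X" := fun e => hx ((h c).mpr e)
      simp [hx, hx']
  unfold canConnect
  split_ifs with h1 h2
  · exact List.all_congr rfl (fun col => congrArg (fun b => !b) (hb (p.1, col)))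
  · exact List.all_congr rfl (fun row => congrArg (fun b => !b) (hb (row, p.2)))
  · rfl

theorem blank_length (g : List (List String)) (p : Nat × Nat) :
    (blankCell g p).length = g.length := List.length_set ..

theorem blank_rowlen (g : List (List String)) (p : Nat × Nat) (i : Nat) :
    ((blankCell g p).getD i []).length = (g.getD i []).length := by
  unfold blankCell
  rcases p with ⟨a, b⟩
  simp only [List.getD_eq_getElem?_getD, List.getElem?_set]
  by_cases h : a = i
  · subst h
    by_cases hl : a < g.length
    · simp [hl]
    · simp [hl]
  · simp [h]

theorem blank_pre (g : List (List String)) (p : Nat × Nat) (hp : p.1 < g.length)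
    (h : Pre_puzzle_solvable g) : Pre_puzzle_solvable (blankCell g p) := by
  intro row hrow
  rw [blank_length]
  rcases List.mem_or_eq_of_mem_set hrow with hmem | rfl
  · exact h row hmem
  · rw [List.length_set, List.getD_eq_getElem _ _ hp]
    exact h _ (List.getElem_mem hp)

theorem valAt_blank (g : List (List String)) (p : Nat × Nat)
    (h1 : p.1 < g.length) (h2 : p.2 < (g.getD p.1 []).length) (c : Nat × Nat) :
    valAt (blankCell g p) c = if c = p then "" else valAt g c := by
  unfold valAt blankCell
  rcases p with ⟨a, b⟩
  rcases c with ⟨x, y⟩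
  dsimp only at h1 h2 ⊢
  rw [List.getD_eq_getElem?_getD] at h2
  simp only [List.getD_eq_getElem?_getD, List.getElem?_set]
  by_cases hx : a = x
  · subst hx
    rw [if_pos rfl, if_pos h1, Option.getD_some, List.getElem?_set]
    by_cases hy : b = y
    · subst hy
      rw [if_pos rfl, if_pos h2, if_pos rfl, Option.getD_some]
    · rw [if_neg hy, if_neg (show ¬((a, y) = (a, b)) from fun h => hy (congrArg Prod.snd h).symm)]
  · rw [if_neg hx, if_neg (show ¬((x, y) = (a, b)) from fun h => hx (congrArg Prod.fst h).symm)]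

-- ---------- permutation-invariant matching ----------

theorem Mat_perm {adj : Nat × Nat → Nat × Nat → Bool} {l l' : List (Nat × Nat)}
    (h : Mat adj l) (hp : l.Perm l') : Mat adj l' := by
  cases h with
  | nil => rw [List.perm_nil.mp hp.symm]; exact Mat.nil
  | step ha hperm hm => exact Mat.step ha (hp.symm.trans hperm) hm

theorem Mat_extract {adj : Nat × Nat → Nat × Nat → Bool}
    (hsym : ∀ a b, adj a b = adj b a) {l : List (Nat × Nat)} (h : Mat adj l)
    {p : Nat × Nat} (hp : p ∈ l) :
    ∃ q l₂, adj p q = true ∧ l.Perm (p :: q :: l₂) ∧ Mat adj l₂ := by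
  induction h generalizing p with
  | nil => cases hp
  | @step a b L l' ha hperm hm ih =>
    have hp' : p ∈ a :: b :: L := hperm.subset hp
    rcases List.mem_cons.mp hp' with rfl | hp''
    · exact ⟨b, L, ha, hperm, hm⟩
    rcases List.mem_cons.mp hp'' with rfl | hpL
    · exact ⟨a, L, (hsym a p) ▸ ha, hperm.trans (List.Perm.swap p a L), hm⟩
    · obtain ⟨q, l₂, hq1, hq2, hq3⟩ := ih hpL
      refine ⟨q, a :: b :: l₂, hq1, ?_, Mat.step ha (List.Perm.refl _) hq3⟩
      refine hperm.trans (((hq2.cons b).cons a).trans ?_)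
      have h5 : (([a, b] : List (Nat × Nat)) ++ p :: q :: l₂).Perm (p :: ([a, b] ++ q :: l₂)) :=
        List.perm_middle
      have h6 : (([a, b] : List (Nat × Nat)) ++ q :: l₂).Perm (q :: ([a, b] ++ l₂)) :=
        List.perm_middle
      exact h5.trans (h6.cons p)

-- ---------- matchAux computes Mat ----------

theorem removeK_perm {α : Type} (l : List α) (k : Nat) (hk : k < l.length) (d : α) :
    l.Perm (l.getD k d :: (l.take k ++ l.drop (k + 1))) := by
  rw [List.getD_eq_getElem l d hk]
  conv_lhs => rw [← List.take_append_drop k l, ← List.getElem_cons_drop hk]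
  exact List.perm_middle

theorem match_iff (g : List (List String)) :
    ∀ (f : Nat) (l : List (Nat × Nat)), l.length ≤ f →
      (matchAux g f l = true ↔ Mat (canConnect g) l) := by
  intro f
  induction f with
  | zero =>
    intro l hl
    rw [List.length_eq_zero_iff.mp (Nat.le_zero.mp hl)]
    exact ⟨fun _ => Mat.nil, fun _ => rfl⟩
  | succ f ih =>
    intro l hl
    cases l with
    | nil => exact ⟨fun _ => Mat.nil, fun _ => rfl⟩
    | cons p rest =>
      rw [show matchAux g (f + 1) (p :: rest) = (List.range rest.length).any (fun k =>
        lineClear g p (rest.getD k (0, 0)) && matchAux g f (rest.take k ++ rest.drop (k + 1))) from rfl]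
      rw [List.length_cons] at hl
      simp only [List.any_eq_true, List.mem_range, Bool.and_eq_true]
      constructor
      · rintro ⟨k, hk, hadj, hrec⟩
        have hlen : (rest.take k ++ rest.drop (k + 1)).length ≤ f := by
          rw [List.length_append, List.length_take, List.length_drop]
          omega
        refine Mat.step ((lineClear_eq_canConnect g _ _) ▸ hadj)
          ((removeK_perm rest k hk (0, 0)).cons p) ((ih _ hlen).mp hrec)
      · intro hM
        obtain ⟨q, l₂, hadj, hperm, hM₂⟩ :=
          Mat_extract (canConnect_symm g) hM (List.mem_cons_self ..)
        have h1 : rest.Perm (q :: l₂) := (List.perm_cons p).mp hperm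
        have hq : q ∈ rest := h1.mem_iff.mpr (List.mem_cons_self ..)
        obtain ⟨k, hk, hqk⟩ := List.mem_iff_getElem.mp hq
        have h3 := removeK_perm rest k hk (0, 0)
        rw [List.getD_eq_getElem _ _ hk, hqk] at h3
        have h2 : (rest.take k ++ rest.drop (k + 1)).Perm l₂ :=
          (List.perm_cons q).mp (h3.symm.trans h1)
        have hlen : (rest.take k ++ rest.drop (k + 1)).length ≤ f := by
          rw [List.length_append, List.length_take, List.length_drop]
          omega
        refine ⟨k, hk, ?_, (ih _ hlen).mpr (Mat_perm hM₂ h2.symm)⟩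
        rw [lineClear_eq_canConnect, List.getD_eq_getElem _ _ hk, hqk]
        exact hadj

theorem group_nil_of_not_key (g : List (List String)) (v : String)
    (hv : ¬ ∃ p ∈ scanOf g, p.1 = v) : group g v = [] := by
  unfold group
  rw [List.map_eq_nil_iff, List.filter_eq_nil_iff]
  intro p hp hpv
  exact hv ⟨p, hp, by simpa using hpv⟩

theorem charB : ∀ (g : List (List String)),
    (puzzle_solvable_alt g = true ↔ AllM g) := by
  intro g
  unfold puzzle_solvable_alt
  rw [groupsB_eq, items_findPairs, List.all_map]
  simp only [List.all_eq_true, Function.comp]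
  constructor
  · intro h v
    by_cases hv : v ∈ (findPairs g).keys
    · exact (match_iff g _ _ le_rfl).mp (h v hv)
    · rw [group_nil_of_not_key g v (fun he => hv ((mem_keys_findPairs g v).mpr he))]
      exact Mat.nil
  · intro h k _
    exact (match_iff g _ _ le_rfl).mpr (h k)

-- ---------- the grid induction for A ----------

theorem rowlen_ge (g : List (List String)) (hpre : Pre_puzzle_solvable g)
    {i : Nat} (hi : i < g.length) : g.length ≤ (g.getD i []).length := by
  rw [List.getD_eq_getElem _ _ hi]
  exact hpre _ (List.getElem_mem hi)

theorem valAt_blank2 (g : List (List String)) (hpre : Pre_puzzle_solvable g)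
    {a b : Nat × Nat} (ha : a ∈ cells g) (hb : b ∈ cells g) (c : Nat × Nat) :
    valAt (blankCell (blankCell g a) b) c
      = if c = b then "" else if c = a then "" else valAt g c := by
  have ha' := (mem_cells g a).mp ha
  have hb' := (mem_cells g b).mp hb
  have hb1 : b.1 < (blankCell g a).length := by rw [blank_length]; exact hb'.1
  have hb2 : b.2 < ((blankCell g a).getD b.1 []).length := by
    rw [blank_rowlen]
    exact lt_of_lt_of_le hb'.2.1 (rowlen_ge g hpre hb'.1)
  rw [valAt_blank _ _ hb1 hb2, valAt_blank _ _ ha'.1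
    (lt_of_lt_of_le ha'.2.1 (rowlen_ge g hpre ha'.1))]

theorem pre_blank2 (g : List (List String)) (hpre : Pre_puzzle_solvable g)
    {a b : Nat × Nat} (ha : a ∈ cells g) (hb : b ∈ cells g) :
    Pre_puzzle_solvable (blankCell (blankCell g a) b) := by
  refine blank_pre _ _ ?_ (blank_pre _ _ ((mem_cells g a).mp ha).1 hpre)
  rw [blank_length]
  exact ((mem_cells g b).mp hb).1

theorem mem_cells_blank2 (g : List (List String)) (hpre : Pre_puzzle_solvable g)
    {a b : Nat × Nat} (ha : a ∈ cells g) (hb : b ∈ cells g) (c : Nat × Nat) :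
    c ∈ cells (blankCell (blankCell g a) b) ↔ (c ∈ cells g ∧ c ≠ a ∧ c ≠ b) := by
  rw [mem_cells, mem_cells, blank_length, blank_length, valAt_blank2 g hpre ha hb c]
  by_cases h1 : c = b
  · simp [h1]
  · by_cases h2 : c = a
    · simp [h2]
    · simp [h1, h2]

theorem mem_group_blank2 (g : List (List String)) (hpre : Pre_puzzle_solvable g)
    {a b : Nat × Nat} (ha : a ∈ cells g) (hb : b ∈ cells g) (v : String) (c : Nat × Nat) :
    c ∈ group (blankCell (blankCell g a) b) v ↔ (c ∈ group g v ∧ c ≠ a ∧ c ≠ b) := by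
  rw [mem_group, mem_group, mem_cells_blank2 g hpre ha hb c, valAt_blank2 g hpre ha hb c]
  by_cases h1 : c = b
  · simp [h1]
  · by_cases h2 : c = a
    · simp [h2]
    · simp only [if_neg h1, if_neg h2]
      tauto

theorem adj_blank2 (g : List (List String)) (hpre : Pre_puzzle_solvable g)
    {a b : Nat × Nat} (ha : a ∈ cells g) (hb : b ∈ cells g) :
    canConnect (blankCell (blankCell g a) b) = canConnect g := by
  funext p q
  refine canConnect_congr _ _ ?_ p q
  intro c
  rw [valAt_blank2 g hpre ha hb c]
  by_cases h1 : c = b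
  · subst h1
    have hx := ((mem_cells g c).mp hb).2.2.2
    simp [hx]
  · by_cases h2 : c = a
    · subst h2
      have hx := ((mem_cells g c).mp ha).2.2.2
      simp [h1, hx]
    · simp [h1, h2]

theorem perm_cons_cons_erase {α : Type} [BEq α] [LawfulBEq α] {l : List α} {a b : α}
    (hnd : l.Nodup) (ha : a ∈ l) (hb : b ∈ l) (hab : a ≠ b) :
    l.Perm (a :: b :: (l.erase a).erase b) := by
  have hb' : b ∈ l.erase a := (List.Nodup.mem_erase_iff hnd).mpr ⟨fun h => hab h.symm, hb⟩
  exact (List.perm_cons_erase ha).trans ((List.perm_cons_erase hb').cons a)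

theorem group_blank2_perm (g : List (List String)) (hpre : Pre_puzzle_solvable g)
    {a b : Nat × Nat} (ha : a ∈ cells g) (hb : b ∈ cells g) (v : String) :
    (group (blankCell (blankCell g a) b) v).Perm (((group g v).erase a).erase b) := by
  rw [List.perm_ext_iff_of_nodup (nodup_group _ _) (((nodup_group g v).erase a).erase b)]
  intro c
  rw [mem_group_blank2 g hpre ha hb v c,
    List.Nodup.mem_erase_iff ((nodup_group g v).erase a),
    List.Nodup.mem_erase_iff (nodup_group g v)]
  tauto

theorem cells_blank2_perm (g : List (List String)) (hpre : Pre_puzzle_solvable g)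
    {a b : Nat × Nat} (ha : a ∈ cells g) (hb : b ∈ cells g) :
    (cells (blankCell (blankCell g a) b)).Perm (((cells g).erase a).erase b) := by
  rw [List.perm_ext_iff_of_nodup (nodup_cells _) (((nodup_cells g).erase a).erase b)]
  intro c
  rw [mem_cells_blank2 g hpre ha hb c,
    List.Nodup.mem_erase_iff ((nodup_cells g).erase a),
    List.Nodup.mem_erase_iff (nodup_cells g)]
  tauto

theorem cells_blank2_length (g : List (List String)) (hpre : Pre_puzzle_solvable g)
    {a b : Nat × Nat} (ha : a ∈ cells g) (hb : b ∈ cells g) (hab : a ≠ b) :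
    (cells g).length = (cells (blankCell (blankCell g a) b)).length + 2 := by
  have h1 := (perm_cons_cons_erase (nodup_cells g) ha hb hab).length_eq
  have h2 := (cells_blank2_perm g hpre ha hb).length_eq
  rw [List.length_cons, List.length_cons] at h1
  omega

theorem group_other_perm (g : List (List String)) (hpre : Pre_puzzle_solvable g)
    {v : String} {p q : Nat × Nat} (hp : p ∈ group g v) (hq : q ∈ group g v)
    {w : String} (hw : w ≠ v) :
    (group g w).Perm (group (blankCell (blankCell g p) q) w) := by
  have hpc : p ∈ cells g := ((mem_group g v p).mp hp).1
  have hqc : q ∈ cells g := ((mem_group g v q).mp hq).1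
  have hv1 : valAt g p = v := ((mem_group g v p).mp hp).2
  have hv2 : valAt g q = v := ((mem_group g v q).mp hq).2
  rw [List.perm_ext_iff_of_nodup (nodup_group _ _) (nodup_group _ _)]
  intro c
  rw [mem_group_blank2 g hpre hpc hqc w c]
  constructor
  · intro hc
    refine ⟨hc, ?_, ?_⟩
    · rintro rfl; exact hw (((mem_group g w _).mp hc).2.symm.trans hv1)
    · rintro rfl; exact hw (((mem_group g w _).mp hc).2.symm.trans hv2)
  · exact fun h => h.1

theorem allm_blank2_of (g : List (List String)) (hpre : Pre_puzzle_solvable g)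
    {v : String} {p q : Nat × Nat} (hp : p ∈ group g v) (hq : q ∈ group g v) (hpq : p ≠ q)
    {L : List (Nat × Nat)} (hperm : (group g v).Perm (p :: q :: L))
    (hmL : Mat (canConnect g) L) (hAll : AllM g) :
    AllM (blankCell (blankCell g p) q) := by
  have hpc : p ∈ cells g := ((mem_group g v p).mp hp).1
  have hqc : q ∈ cells g := ((mem_group g v q).mp hq).1
  intro w
  rw [adj_blank2 g hpre hpc hqc]
  by_cases hw : w = v
  · subst hw
    have h2 := perm_cons_cons_erase (nodup_group g w) hp hq hpq
    have h1 : (((group g w).erase p).erase q).Perm L :=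
      (List.perm_cons q).mp ((List.perm_cons p).mp (h2.symm.trans hperm))
    exact Mat_perm hmL (h1.symm.trans (group_blank2_perm g hpre hpc hqc w).symm)
  · exact Mat_perm (hAll w) (group_other_perm g hpre hp hq hw)

theorem allm_of_blank2 (g : List (List String)) (hpre : Pre_puzzle_solvable g)
    {v : String} {p q : Nat × Nat} (hp : p ∈ group g v) (hq : q ∈ group g v) (hpq : p ≠ q)
    (hcc : canConnect g p q = true)
    (hAll2 : AllM (blankCell (blankCell g p) q)) : AllM g := by
  have hpc : p ∈ cells g := ((mem_group g v p).mp hp).1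
  have hqc : q ∈ cells g := ((mem_group g v q).mp hq).1
  intro w
  have hMw := hAll2 w
  rw [adj_blank2 g hpre hpc hqc] at hMw
  by_cases hw : w = v
  · subst hw
    refine Mat.step hcc ?_ hMw
    exact (perm_cons_cons_erase (nodup_group g w) hp hq hpq).trans
      (((group_blank2_perm g hpre hpc hqc w).symm.cons q).cons p)
  · exact Mat_perm hMw (group_other_perm g hpre hp hq hw).symm

theorem items_nil_iff (g : List (List String)) :
    (findPairs g).items = [] ↔ scanOf g = [] := by
  constructor
  · intro h
    cases hs : scanOf g with
    | nil => rfl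
    | cons x t =>
      have hk : x.1 ∈ (findPairs g).keys :=
        (mem_keys_findPairs g x.1).mpr ⟨x, by rw [hs]; exact List.mem_cons_self .., rfl⟩
      rw [items_findPairs] at h
      rw [List.map_eq_nil_iff.mp h] at hk
      cases hk
  · intro h
    rw [items_findPairs, keys_findPairs, h]
    rfl

theorem solvAux_succ_true_iff (g : List (List String)) (fuel : Nat)
    (hne : scanOf g ≠ []) :
    solvAux (fuel + 1) g = true ↔
      ∃ v ∈ (findPairs g).keys, ∃ i j : Nat, i < (group g v).length ∧ i < j ∧
        j < (group g v).length ∧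
        canConnect g ((group g v).getD i (0, 0)) ((group g v).getD j (0, 0)) = true ∧
        solvAux fuel (blankCell (blankCell g ((group g v).getD i (0, 0)))
          ((group g v).getD j (0, 0))) = true := by
  rw [show solvAux (fuel + 1) g = (if (findPairs g).items.isEmpty then true else
    (findPairs g).items.any (fun vc =>
      (List.range vc.2.length).any (fun i =>
        (List.range' (i + 1) (vc.2.length - (i + 1))).any (fun j =>
          canConnect g (vc.2.getD i (0, 0)) (vc.2.getD j (0, 0)) &&
          solvAux fuel (blankCell (blankCell g (vc.2.getD i (0, 0))) (vc.2.getD j (0, 0)))))))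
    from rfl]
  rw [if_neg (by rw [List.isEmpty_iff]; exact fun h => hne ((items_nil_iff g).mp h))]
  rw [items_findPairs, List.any_map]
  simp only [List.any_eq_true, List.mem_range, List.mem_range'_1, Bool.and_eq_true,
    Function.comp_apply]
  constructor
  · rintro ⟨k, hk, i, hi, j, ⟨hj1, hj2⟩, hcc, hrec⟩
    exact ⟨k, hk, i, j, hi, by omega, by omega, hcc, hrec⟩
  · rintro ⟨v, hv, i, j, hi, hij, hj, hcc, hrec⟩
    exact ⟨v, hv, i, hi, j, ⟨by omega, by omega⟩, hcc, hrec⟩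

theorem charA : ∀ (fuel : Nat) (g : List (List String)),
    Pre_puzzle_solvable g → (cells g).length < fuel →
    (solvAux fuel g = true ↔ AllM g) := by
  intro fuel
  induction fuel with
  | zero => intro g _ h; exact absurd h (Nat.not_lt_zero _)
  | succ fuel ih =>
    intro g hpre hlen
    by_cases hscan : scanOf g = []
    · constructor
      · intro _ v
        have hgnil : group g v = [] := by unfold group; rw [hscan]; rfl
        rw [hgnil]; exact Mat.nil
      · intro _
        rw [show solvAux (fuel + 1) g = (if (findPairs g).items.isEmpty then true else _)
          from rfl]
        rw [if_pos (by rw [List.isEmpty_iff, items_nil_iff]; exact hscan)]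
    · rw [solvAux_succ_true_iff g fuel hscan]
      constructor
      · rintro ⟨v, hv, i, j, hi, hij, hj, hcc, hrec⟩
        rw [List.getD_eq_getElem _ _ hi, List.getD_eq_getElem _ _ hj] at hcc hrec
        have hpg : (group g v)[i] ∈ group g v := List.getElem_mem hi
        have hqg : (group g v)[j] ∈ group g v := List.getElem_mem hj
        have hpq : (group g v)[i] ≠ (group g v)[j] := fun h =>
          absurd (((nodup_group g v).getElem_inj_iff).mp h) (by omega)
        have hpc : (group g v)[i] ∈ cells g := ((mem_group g v _).mp hpg).1
        have hqc : (group g v)[j] ∈ cells g := ((mem_group g v _).mp hqg).1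
        have hlen2 := cells_blank2_length g hpre hpc hqc hpq
        have hAll2 := (ih _ (pre_blank2 g hpre hpc hqc) (by omega)).mp hrec
        exact allm_of_blank2 g hpre hpg hqg hpq hcc hAll2
      · intro hAll
        have hcne : cells g ≠ [] := fun h => hscan (List.map_eq_nil_iff.mp h)
        obtain ⟨c0, hc0⟩ := List.exists_mem_of_ne_nil _ hcne
        have hc0g : c0 ∈ group g (valAt g c0) := (mem_group g _ c0).mpr ⟨hc0, rfl⟩
        have hc0' := (mem_cells g c0).mp hc0
        have hkey : valAt g c0 ∈ (findPairs g).keys :=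
          (mem_keys_findPairs g _).mpr ⟨(valAt g c0, c0),
            (mem_scanOf g _).mpr ⟨hc0'.1, hc0'.2.1, rfl, hc0'.2.2.1, hc0'.2.2.2⟩, rfl⟩
        have hM := hAll (valAt g c0)
        generalize hg : group g (valAt g c0) = grp at hM hc0g
        cases hM with
        | nil => cases hc0g
        | @step a b L l' ha hperm hmL =>
          have hndgrp : grp.Nodup := by rw [← hg]; exact nodup_group g _
          have hpgrp : a ∈ grp := hperm.mem_iff.mpr (List.mem_cons_self ..)
          have hqgrp : b ∈ grp :=
            hperm.mem_iff.mpr (List.mem_cons_of_mem a (List.mem_cons_self ..))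
          have hab : a ≠ b := by
            have hnd2 : (a :: b :: L).Nodup := hperm.nodup_iff.mp hndgrp
            exact fun h => (List.nodup_cons.mp hnd2).1 (h ▸ List.mem_cons_self ..)
          have hag : a ∈ group g (valAt g c0) := by rw [hg]; exact hpgrp
          have hbg : b ∈ group g (valAt g c0) := by rw [hg]; exact hqgrp
          obtain ⟨ia, hia, hiae⟩ := List.mem_iff_getElem.mp hpgrp
          obtain ⟨ib, hib, hibe⟩ := List.mem_iff_getElem.mp hqgrp
          have hne : ia ≠ ib := fun h => hab (by subst h; exact hiae.symm.trans hibe)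
          rcases Nat.lt_or_ge ia ib with hlt | hge
          · refine ⟨valAt g c0, hkey, ia, ib, by rw [hg]; exact hia, hlt,
              by rw [hg]; exact hib, ?_, ?_⟩
            · rw [hg, List.getD_eq_getElem _ _ hia, List.getD_eq_getElem _ _ hib, hiae, hibe]
              exact ha
            · rw [hg, List.getD_eq_getElem _ _ hia, List.getD_eq_getElem _ _ hib, hiae, hibe]
              have hpc : a ∈ cells g := ((mem_group g _ _).mp hag).1
              have hqc : b ∈ cells g := ((mem_group g _ _).mp hbg).1
              have hlen2 := cells_blank2_length g hpre hpc hqc hab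
              refine (ih _ (pre_blank2 g hpre hpc hqc) (by omega)).mpr ?_
              exact allm_blank2_of g hpre hag hbg hab (by rw [hg]; exact hperm) hmL hAll
          · have hlt : ib < ia := lt_of_le_of_ne hge (fun h => hne h.symm)
            refine ⟨valAt g c0, hkey, ib, ia, by rw [hg]; exact hib, hlt,
              by rw [hg]; exact hia, ?_, ?_⟩
            · rw [hg, List.getD_eq_getElem _ _ hib, List.getD_eq_getElem _ _ hia, hibe, hiae,
                canConnect_symm g b a]
              exact ha
            · rw [hg, List.getD_eq_getElem _ _ hib, List.getD_eq_getElem _ _ hia, hibe, hiae]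
              have hpc : b ∈ cells g := ((mem_group g _ _).mp hbg).1
              have hqc : a ∈ cells g := ((mem_group g _ _).mp hag).1
              have hlen2 := cells_blank2_length g hpre hpc hqc (fun h => hab h.symm)
              refine (ih _ (pre_blank2 g hpre hpc hqc) (by omega)).mpr ?_
              exact allm_blank2_of g hpre hbg hag (fun h => hab h.symm)
                (by rw [hg]; exact hperm.trans (List.Perm.swap b a L)) hmL hAll


-- ===== VERDICT (by name: the statement is the Claim_ definition above) =====
theorem puzzle_solvable_spec : Claim_equal_puzzle_solvable := by
  intro g _ hpre
  unfold Spec_puzzle_solvable puzzle_solvable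
  have hA := charA (g.length * g.length + 1) g hpre (Nat.lt_succ_of_le (cells_len_le g))
  have hB := charB g
  cases hb : puzzle_solvable_alt g
  · cases ha : solvAux (g.length * g.length + 1) g
    · rfl
    · exact absurd (hB.mpr (hA.mp ha)) (by simp [hb])
  · exact (hA.mpr (hB.mp hb))
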